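-- pv_equiv track=rewrite | github.com/ipetrushenko-softheme/codejam | bsearch/11-1293A.py | compute_min
-- ===== SOURCE A (Python) =====
-- def compute_min(n, s: int, closed: list):
--     l = set(closed)
--     m = h = n - 1
--     for i in range(s, n + 1):
--         if i not in l:
--             m = i - s
--             break
--     for i in range(s, 0, -1):
--         if i not in l:
--             h = s - i
--             break
--     return min(m, h)
-- ===== SOURCE B (Python) =====
-- def compute_min(n, s: int, closed: list):
--     occupied = set(closed)
--     d = 0
--     while True:
--         if d >= n - 1:
--             return n - 1
--         if (s + d <= n and s + d not in occupied) or (s - d >= 1 and s - d not in occupied):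
--             return d
--         d += 1
-- ===== Notes on version B (the rewrite author's own statement) =====
-- stated objective: alternative
-- what changed: Replaces A's two directional scans (up over range(s,n+1), down over range(s,0,-1)) plus a final min with a single outward-expansion loop over the distance d = 0,1,2,... that returns the first d at which an in-bounds open seat exists, capped by the n-1 fallback.
import Mathlib
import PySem

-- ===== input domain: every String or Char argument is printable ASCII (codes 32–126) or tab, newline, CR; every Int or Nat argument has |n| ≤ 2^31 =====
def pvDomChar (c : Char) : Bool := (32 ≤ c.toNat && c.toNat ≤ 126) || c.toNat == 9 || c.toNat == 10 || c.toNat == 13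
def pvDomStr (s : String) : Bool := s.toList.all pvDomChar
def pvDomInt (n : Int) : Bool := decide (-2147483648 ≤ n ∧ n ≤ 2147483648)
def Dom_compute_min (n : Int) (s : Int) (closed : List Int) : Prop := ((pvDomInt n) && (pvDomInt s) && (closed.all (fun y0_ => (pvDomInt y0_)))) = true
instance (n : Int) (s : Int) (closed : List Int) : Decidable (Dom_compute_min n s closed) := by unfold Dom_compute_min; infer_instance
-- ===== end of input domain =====

-- B replaces A's two directional scans + final min with one outward-expansion loop over the distance (alternative decomposition, same cost).


-- ===== PORT A =====
-- 'for i in range(s, n+1): if i not in l: m = i - s; break' — Python's range is lazy and the loop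
-- breaks, so it is ported by hand, step for step, as a recursion on i with the range's length as
-- structural fuel (fuel = number of remaining iterations, exactly len(range(i, n+1)))
def pvUpA (l : PySem.Set Int) (s n m : Int) : Nat → Int → Int
  | 0, _ => m
  | fuel + 1, i => if i ∈ l then pvUpA l s n m fuel (i + 1) else i - s

-- 'for i in range(s, 0, -1): if i not in l: h = s - i; break' — same, counting down
def pvDownA (l : PySem.Set Int) (s n h : Int) : Nat → Int → Int
  | 0, _ => h
  | fuel + 1, i => if i ∈ l then pvDownA l s n h fuel (i - 1) else s - i

def compute_min (n : Int) (s : Int) (closed : List Int) : Int :=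
  let l := PySem.Set.ofList closed
  let m := pvUpA l s n (n - 1) (n + 1 - s).toNat s
  let h := pvDownA l s n (n - 1) s.toNat s
  min m h

-- ===== PORT B =====
-- B's 'while True' loop: d grows until the cap n-1 is reached or an in-bounds open seat exists at
-- distance d; it returns by d = max(n-1, 0) at the latest, which bounds the structural fuel
def pvLoopB (n : Int) (s : Int) (occupied : PySem.Set Int) : Nat → Int → Int
  | 0, _ => n - 1
  | fuel + 1, d =>
    if n - 1 ≤ d then n - 1
    else if (s + d ≤ n ∧ (s + d) ∉ occupied) ∨ (1 ≤ s - d ∧ (s - d) ∉ occupied) then d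
    else pvLoopB n s occupied fuel (d + 1)

def compute_min_alt (n : Int) (s : Int) (closed : List Int) : Int :=
  pvLoopB n s (PySem.Set.ofList closed) ((n - 1).toNat + 1) 0

-- ===== PRECONDITION & SPEC =====
def Spec_compute_min (n : Int) (s : Int) (closed : List Int) (out : Int) : Prop := out = compute_min_alt n s closed
instance (n : Int) (s : Int) (closed : List Int) (out : Int) : Decidable (Spec_compute_min n s closed out) := by unfold Spec_compute_min; infer_instance

-- ===== CLAIM (what is proved, stated in full; the proofs are below) =====
def Claim_equal_compute_min : Prop := ∀ (n : Int) (s : Int) (closed : List Int), Dom_compute_min n s closed → Spec_compute_min n s closed (compute_min n s closed)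

-- ===== LEMMAS AND PROOFS =====

-- bound on the up scan: either the default n-1, or a found distance in [i-s, n-s]
theorem pvUpA_bound (l : PySem.Set Int) (n s : Int) : ∀ (fuel : Nat) (i : Int),
    fuel = (n + 1 - i).toNat →
    pvUpA l s n (n - 1) fuel i = n - 1 ∨
    (i - s ≤ pvUpA l s n (n - 1) fuel i ∧ pvUpA l s n (n - 1) fuel i ≤ n - s) := by
  intro fuel
  induction fuel with
  | zero => intro i _; left; rfl
  | succ fuel ih =>
    intro i hf
    by_cases hm : i ∈ l
    · rw [pvUpA, if_pos hm]
      rcases ih (i + 1) (by omega) with h1 | ⟨h1, h2⟩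
      · left; exact h1
      · right; constructor <;> omega
    · rw [pvUpA, if_neg hm]; right; constructor <;> omega

-- bound on the down scan: either the default n-1, or a found distance in [s-i, s-1]
theorem pvDownA_bound (l : PySem.Set Int) (n s : Int) : ∀ (fuel : Nat) (i : Int),
    fuel = i.toNat →
    pvDownA l s n (n - 1) fuel i = n - 1 ∨
    (s - i ≤ pvDownA l s n (n - 1) fuel i ∧ pvDownA l s n (n - 1) fuel i ≤ s - 1) := by
  intro fuel
  induction fuel with
  | zero => intro i _; left; rfl
  | succ fuel ih =>
    intro i hf
    by_cases hm : i ∈ l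
    · rw [pvDownA, if_pos hm]
      rcases ih (i - 1) (by omega) with h1 | ⟨h1, h2⟩
      · left; exact h1
      · right; constructor <;> omega
    · rw [pvDownA, if_neg hm]; right; constructor <;> omega

theorem pvLoopB_eq_min (n s : Int) (l : PySem.Set Int) : ∀ (fuel : Nat) (d : Int), 0 ≤ d →
    fuel = (n - 1 - d).toNat + 1 →
    pvLoopB n s l fuel d =
      min (pvUpA l s n (n - 1) (n + 1 - (s + d)).toNat (s + d))
          (pvDownA l s n (n - 1) (s - d).toNat (s - d)) := by
  intro fuel
  induction fuel with
  | zero => intro d _ hf; omega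
  | succ fuel ih =>
    intro d hd hf
    by_cases hstop : n - 1 ≤ d
    · rw [pvLoopB, if_pos hstop]
      rcases pvUpA_bound l n s (n + 1 - (s + d)).toNat (s + d) rfl with hu | ⟨hu1, hu2⟩ <;>
        rcases pvDownA_bound l n s (s - d).toNat (s - d) rfl with hv | ⟨hv1, hv2⟩ <;>
        · rw [min_def]; split_ifs <;> omega
    · rw [pvLoopB, if_neg hstop]
      by_cases hacc : (s + d ≤ n ∧ (s + d) ∉ l) ∨ (1 ≤ s - d ∧ (s - d) ∉ l)
      · rw [if_pos hacc]
        rcases hacc with ⟨hb, ho⟩ | ⟨hb, ho⟩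
        · have hmval : pvUpA l s n (n - 1) (n + 1 - (s + d)).toNat (s + d) = d := by
            rw [show (n + 1 - (s + d)).toNat = (n - s - d).toNat + 1 from by omega,
              pvUpA, if_neg ho]
            omega
          rcases pvDownA_bound l n s (s - d).toNat (s - d) rfl with hv | ⟨hv1, hv2⟩ <;>
            · rw [hmval, min_def]; split_ifs <;> omega
        · have hhval : pvDownA l s n (n - 1) (s - d).toNat (s - d) = d := by
            rw [show (s - d).toNat = (s - d - 1).toNat + 1 from by omega,
              pvDownA, if_neg ho]
            omega
          rcases pvUpA_bound l n s (n + 1 - (s + d)).toNat (s + d) rfl with hu | ⟨hu1, hu2⟩ <;>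
            · rw [hhval, min_def]; split_ifs <;> omega
      · rw [if_neg hacc]
        push Not at hacc
        obtain ⟨hup, hdn⟩ := hacc
        have e1 : pvUpA l s n (n - 1) (n + 1 - (s + d)).toNat (s + d)
            = pvUpA l s n (n - 1) (n + 1 - (s + (d + 1))).toNat (s + (d + 1)) := by
          by_cases hb : s + d ≤ n
          · rw [show (n + 1 - (s + d)).toNat = (n + 1 - (s + (d + 1))).toNat + 1 from by omega,
              pvUpA, if_pos (hup hb), show s + d + 1 = s + (d + 1) from by ring]
          · rw [show (n + 1 - (s + d)).toNat = 0 from by omega,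
              show (n + 1 - (s + (d + 1))).toNat = 0 from by omega]
            rfl
        have e2 : pvDownA l s n (n - 1) (s - d).toNat (s - d)
            = pvDownA l s n (n - 1) (s - (d + 1)).toNat (s - (d + 1)) := by
          by_cases hb : 1 ≤ s - d
          · rw [show (s - d).toNat = (s - (d + 1)).toNat + 1 from by omega,
              pvDownA, if_pos (hdn hb), show s - d - 1 = s - (d + 1) from by ring]
          · rw [show (s - d).toNat = 0 from by omega,
              show (s - (d + 1)).toNat = 0 from by omega]
            rfl
        rw [e1, e2]
        exact ih (d + 1) (by omega) (by omega)

-- ===== VERDICT (by name: the statement is the Claim_ definition above) =====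
theorem compute_min_spec : Claim_equal_compute_min := by
  intro n s closed _
  unfold Spec_compute_min compute_min compute_min_alt
  have h := pvLoopB_eq_min n s (PySem.Set.ofList closed) ((n - 1).toNat + 1) 0 le_rfl (by omega)
  simpa using h.symm
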